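-- pv_equiv track=rewrite | github.com/njraladdin/asin-product-details-scraper | src/csv_formatter.py | sort_fieldnames
-- ===== SOURCE A (Python) =====
-- from typing import Dict, List, Any, Optional, Set
--
-- def sort_fieldnames(fieldnames: List[str]) -> List[str]:
--     """
--     Sort fieldnames to ensure product details come first, followed by offers data.
--
--     Args:
--         fieldnames: List of field names to sort
--
--     Returns:
--         Sorted list of field names
--     """
--     # Define priority prefixes in the order we want them to appear
--     priority_prefixes = [
--         'asin', 'ASIN', 'timestamp', 'Timestamp',
--         'product_details_main_product_details_section',
--         'product_details_reviews_histogram_section',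
--         'product_details_product_information_section',
--         'product_details_aplus_content',
--         'product_details',
--         'Brand', 'Title', 'Price', 'Average_Rating', 'Review'
--     ]
--
--     # Secondary importance fields
--     secondary_prefixes = [
--         'offers_data', 'Offer_'
--     ]
--
--     # Group fields by their importance
--     priority_fields = []
--     secondary_fields = []
--     remaining_fields = []
--
--     for field in fieldnames:
--         # Check if field matches any priority prefix
--         if any(field.startswith(prefix) for prefix in priority_prefixes):
--             priority_fields.append(field)
--         # Check if field matches any secondary prefix
--         elif any(field.startswith(prefix) for prefix in secondary_prefixes):
--             secondary_fields.append(field)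
--         # If no match, add to remaining fields
--         else:
--             remaining_fields.append(field)
--
--     # Sort within each group
--     priority_fields.sort()
--     secondary_fields.sort()
--     remaining_fields.sort()
--
--     # Combine all groups in order of priority
--     return priority_fields + remaining_fields + secondary_fields
-- ===== SOURCE B (Python) =====
-- from typing import List
--
-- _PRIORITY_PREFIXES = [
--     'asin', 'ASIN', 'timestamp', 'Timestamp',
--     'product_details_main_product_details_section',
--     'product_details_reviews_histogram_section',
--     'product_details_product_information_section',
--     'product_details_aplus_content',
--     'product_details',
--     'Brand', 'Title', 'Price', 'Average_Rating', 'Review'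
-- ]
--
-- _SECONDARY_PREFIXES = ['offers_data', 'Offer_']
--
--
-- def _is_priority(field: str) -> bool:
--     return any(field.startswith(prefix) for prefix in _PRIORITY_PREFIXES)
--
--
-- def _is_secondary(field: str) -> bool:
--     return any(field.startswith(prefix) for prefix in _SECONDARY_PREFIXES)
--
--
-- def _rank(field: str) -> int:
--     if _is_priority(field):
--         return 0
--     if _is_secondary(field):
--         return 2
--     return 1
--
--
-- def sort_fieldnames(fieldnames: List[str]) -> List[str]:
--     ordered = sorted(fieldnames)
--     return ([f for f in ordered if _rank(f) == 0]
--             + [f for f in ordered if _rank(f) == 1]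
--             + [f for f in ordered if _rank(f) == 2])
-- ===== Notes on version B (the rewrite author's own statement) =====
-- stated objective: alternative
-- what changed: B sorts the whole list once and splits the sorted list into the three rank groups by filtering, instead of A's partition-into-three-buckets followed by three separate sorts and concatenation.
import Mathlib
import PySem

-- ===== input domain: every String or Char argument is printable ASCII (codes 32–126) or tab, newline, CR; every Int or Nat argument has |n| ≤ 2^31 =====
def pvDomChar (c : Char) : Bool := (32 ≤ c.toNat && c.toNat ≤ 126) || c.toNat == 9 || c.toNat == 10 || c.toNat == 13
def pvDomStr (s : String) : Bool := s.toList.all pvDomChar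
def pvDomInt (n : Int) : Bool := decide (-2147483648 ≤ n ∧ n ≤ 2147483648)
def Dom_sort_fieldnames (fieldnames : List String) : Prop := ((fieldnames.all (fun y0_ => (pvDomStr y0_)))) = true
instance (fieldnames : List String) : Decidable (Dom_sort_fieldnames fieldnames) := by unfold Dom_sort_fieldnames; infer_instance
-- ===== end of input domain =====

-- B sorts the whole list once and then splits the sorted list into the three rank groups by
-- filtering, instead of A's partition into three buckets each sorted separately (alternative
-- decomposition; results proved equal).

-- ===== PORT A =====
-- the two prefix lists both programs use verbatim
def priorityPrefixes : List String :=
  ["asin", "ASIN", "timestamp", "Timestamp",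
   "product_details_main_product_details_section",
   "product_details_reviews_histogram_section",
   "product_details_product_information_section",
   "product_details_aplus_content",
   "product_details",
   "Brand", "Title", "Price", "Average_Rating", "Review"]

def secondaryPrefixes : List String := ["offers_data", "Offer_"]

-- A: one pass appending each field into (priority_fields, secondary_fields, remaining_fields),
-- then sort each group and concatenate priority ++ remaining ++ secondary.
def sort_fieldnames (fieldnames : List String) : List String :=
  let t := fieldnames.foldl
    (fun (acc : List String × List String × List String) field =>
      if priorityPrefixes.any (fun prefix_ => PySem.Str.startswith field prefix_) then
        (acc.1 ++ [field], acc.2.1, acc.2.2)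
      else if secondaryPrefixes.any (fun prefix_ => PySem.Str.startswith field prefix_) then
        (acc.1, acc.2.1 ++ [field], acc.2.2)
      else
        (acc.1, acc.2.1, acc.2.2 ++ [field]))
    ([], [], [])
  PySem.List.sorted t.1 (fun x => x) false
    ++ PySem.List.sorted t.2.2 (fun x => x) false
    ++ PySem.List.sorted t.2.1 (fun x => x) false

-- ===== PORT B =====
def pA (field : String) : Bool :=
  priorityPrefixes.any (fun prefix_ => PySem.Str.startswith field prefix_)

def pS (field : String) : Bool :=
  secondaryPrefixes.any (fun prefix_ => PySem.Str.startswith field prefix_)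

def rankB (field : String) : Int :=
  if pA field then 0
  else if pS field then 2
  else 1

def sort_fieldnames_alt (fieldnames : List String) : List String :=
  let ordered := PySem.List.sorted fieldnames (fun x => x) false
  ordered.filter (fun f => rankB f == 0)
    ++ ordered.filter (fun f => rankB f == 1)
    ++ ordered.filter (fun f => rankB f == 2)

-- ===== PRECONDITION & SPEC =====
def Spec_sort_fieldnames (fieldnames : List String) (out : List String) : Prop := out = sort_fieldnames_alt fieldnames
instance (fieldnames : List String) (out : List String) : Decidable (Spec_sort_fieldnames fieldnames out) := by unfold Spec_sort_fieldnames; infer_instance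

-- ===== CLAIM (what is proved, stated in full; the proofs are below) =====
def Claim_equal_sort_fieldnames : Prop := ∀ (fieldnames : List String), Dom_sort_fieldnames fieldnames → Spec_sort_fieldnames fieldnames (sort_fieldnames fieldnames)

-- ===== LEMMAS AND PROOFS =====

-- a stable identity-keyed sort commutes with filtering
theorem sorted_filter_comm (q : String → Bool) (xs : List String) :
    (PySem.List.sorted xs (fun x => x) false).filter q
      = PySem.List.sorted (xs.filter q) (fun x => x) false := by
  symm
  apply PySem.List.sorted_id_eq_of_perm_of_pairwise
  · exact (PySem.List.sorted_perm xs (fun x => x) false).filter q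
  · exact (PySem.List.sorted_pairwise (κ := String) xs (fun x => x)).filter q

-- A's partition loop collects exactly the three filters, in input order
theorem foldl_partition (xs : List String) (acc : List String × List String × List String) :
    xs.foldl
      (fun (acc : List String × List String × List String) field =>
        if priorityPrefixes.any (fun prefix_ => PySem.Str.startswith field prefix_) then
          (acc.1 ++ [field], acc.2.1, acc.2.2)
        else if secondaryPrefixes.any (fun prefix_ => PySem.Str.startswith field prefix_) then
          (acc.1, acc.2.1 ++ [field], acc.2.2)
        else
          (acc.1, acc.2.1, acc.2.2 ++ [field])) acc
    = (acc.1 ++ xs.filter pA,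
       acc.2.1 ++ xs.filter (fun f => !pA f && pS f),
       acc.2.2 ++ xs.filter (fun f => !pA f && !pS f)) := by
  induction xs generalizing acc with
  | nil => simp
  | cons x t ih =>
    rw [List.foldl_cons]
    by_cases h1 : priorityPrefixes.any (fun prefix_ => PySem.Str.startswith x prefix_) = true
    · rw [if_pos h1, ih]
      have hA : pA x = true := h1
      simp [List.filter_cons, hA]
    · rw [if_neg h1]
      have hA : pA x = false := by
        cases h : pA x with
        | false => rfl
        | true => exact absurd h h1
      by_cases h2 : secondaryPrefixes.any (fun prefix_ => PySem.Str.startswith x prefix_) = true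
      · rw [if_pos h2, ih]
        have hS : pS x = true := h2
        simp [List.filter_cons, hA, hS]
      · rw [if_neg h2, ih]
        have hS : pS x = false := by
          cases h : pS x with
          | false => rfl
          | true => exact absurd h h2
        simp [List.filter_cons, hA, hS]

theorem rank0_iff (f : String) : (rankB f == 0) = pA f := by
  unfold rankB; cases pA f <;> cases pS f <;> decide

theorem rank1_iff (f : String) : (rankB f == 1) = (!pA f && !pS f) := by
  unfold rankB; cases pA f <;> cases pS f <;> decide

theorem rank2_iff (f : String) : (rankB f == 2) = (!pA f && pS f) := by
  unfold rankB; cases pA f <;> cases pS f <;> decide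

-- ===== VERDICT (by name: the statement is the Claim_ definition above) =====
theorem sort_fieldnames_spec : Claim_equal_sort_fieldnames := by
  intro fieldnames _
  unfold Spec_sort_fieldnames sort_fieldnames sort_fieldnames_alt
  rw [foldl_partition]
  simp only [List.nil_append]
  rw [show (fun f => rankB f == 0) = pA from funext rank0_iff,
      show (fun f => rankB f == 1) = (fun f => !pA f && !pS f) from funext rank1_iff,
      show (fun f => rankB f == 2) = (fun f => !pA f && pS f) from funext rank2_iff,
      sorted_filter_comm, sorted_filter_comm, sorted_filter_comm]
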